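-- pv_equiv track=rewrite | github.com/ambientnuance/pycuties | src/pycuties/expandobox.py | find_indices_to_remove
-- ===== SOURCE A (Python) =====
-- from typing import (Union as T_Union,
--                     List as List_T,
--                     Deque as Deck_T)
--
-- def find_indices_to_remove(source: List_T,
--                            rm: List_T,
--                            ) -> List_T[int]:
--     n_match = -1
--     indices = list()
--     for i_source, item in enumerate(source):
--         if item in rm:
--             n_match += 1
--             indices.append(i_source - n_match)
--     return indices
-- ===== SOURCE B (Python) =====
-- def find_indices_to_remove(source, rm):
--     # Back-to-front construction: no indices, no counters.
--     # A matched item's adjusted index equals the number of non-matched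
--     # items preceding it, so walking from the end: a match contributes a
--     # leading 0, a non-match shifts every already-collected value by 1.
--     res = []
--     for item in reversed(source):
--         if item in rm:
--             res = [0] + res
--         else:
--             res = [x + 1 for x in res]
--     return res
-- ===== Notes on version B (the rewrite author's own statement) =====
-- stated objective: alternative
-- what changed: Replaces the forward enumerate loop with a running match counter by a back-to-front construction that keeps no indices or counters at all: iterating reversed(source), a match prepends 0 and a non-match shifts all collected values by +1 (correct because each adjusted index equals the count of non-matched items before that match).
import Mathlib
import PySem

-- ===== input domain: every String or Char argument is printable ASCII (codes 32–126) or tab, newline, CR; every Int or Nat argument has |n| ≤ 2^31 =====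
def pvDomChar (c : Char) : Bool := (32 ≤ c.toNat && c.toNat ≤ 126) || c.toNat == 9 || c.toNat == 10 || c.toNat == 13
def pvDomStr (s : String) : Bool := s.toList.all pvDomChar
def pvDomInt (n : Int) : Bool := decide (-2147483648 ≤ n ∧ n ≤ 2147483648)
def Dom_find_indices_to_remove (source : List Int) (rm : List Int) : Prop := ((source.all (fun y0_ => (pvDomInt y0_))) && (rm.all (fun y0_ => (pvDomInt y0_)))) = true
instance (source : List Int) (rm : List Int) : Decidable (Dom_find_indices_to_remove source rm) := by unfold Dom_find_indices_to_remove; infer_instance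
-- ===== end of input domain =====

-- B rebuilds the result back-to-front with no indices or counters (alternative decomposition, same result).

-- ===== PORT A =====
-- A: forward enumerate loop threading the running counter n_match, appending i - n_match on each match.
def find_indices_to_remove (source : List Int) (rm : List Int) : List Int :=
  ((PySem.List.enumerate source).foldl
    (fun (st : Int × List Int) (p : Int × Int) =>
      if p.2 ∈ rm then (st.1 + 1, st.2 ++ [p.1 - (st.1 + 1)]) else st)
    (-1, [])).2

-- ===== PORT B =====
-- B: loop over reversed(source); a match prepends 0, a non-match shifts all collected values by 1.
def find_indices_to_remove_alt (source : List Int) (rm : List Int) : List Int :=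
  source.reverse.foldl
    (fun (res : List Int) (item : Int) =>
      if item ∈ rm then 0 :: res else res.map (· + 1))
    []

-- ===== PRECONDITION & SPEC =====
def Spec_find_indices_to_remove (source : List Int) (rm : List Int) (out : List Int) : Prop := out = find_indices_to_remove_alt source rm
instance (source : List Int) (rm : List Int) (out : List Int) : Decidable (Spec_find_indices_to_remove source rm out) := by unfold Spec_find_indices_to_remove; infer_instance

-- ===== CLAIM (what is proved, stated in full; the proofs are below) =====
def Claim_equal_find_indices_to_remove : Prop := ∀ (source : List Int) (rm : List Int), Dom_find_indices_to_remove source rm → Spec_find_indices_to_remove source rm (find_indices_to_remove source rm)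

-- ===== LEMMAS AND PROOFS =====
-- B's reversed-loop foldl is the foldr of the same step function.
theorem fitr_alt_foldr (source rm : List Int) :
    find_indices_to_remove_alt source rm
      = source.foldr (fun item res => if item ∈ rm then 0 :: res else res.map (· + 1)) [] := by
  simp [find_indices_to_remove_alt, List.foldl_reverse]

-- A's fold over the enumeration from start k with counter n produces B's list shifted by k - (n+1).
theorem fitr_key (rm : List Int) (l : List Int) :
    ∀ (k n : Int) (acc : List Int),
    ((PySem.List.enumerate l k).foldl
      (fun (st : Int × List Int) (p : Int × Int) =>
        if p.2 ∈ rm then (st.1 + 1, st.2 ++ [p.1 - (st.1 + 1)]) else st)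
      (n, acc)).2
    = acc ++ (l.foldr (fun item res => if item ∈ rm then 0 :: res else res.map (· + 1)) []).map
        (· + (k - (n + 1))) := by
  induction l with
  | nil => intro k n acc; simp [PySem.List.enumerate_nil]
  | cons x l ih =>
    intro k n acc
    by_cases h : x ∈ rm
    · simp only [PySem.List.enumerate_cons, List.foldl_cons, List.foldr_cons, h, if_pos]
      rw [ih]
      simp [List.map_cons]
    · simp only [PySem.List.enumerate_cons, List.foldl_cons, List.foldr_cons, h, if_neg,
        not_false_iff]
      rw [ih]
      simp only [List.map_map]
      congr 1
      apply List.map_congr_left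
      intro a _
      simp
      ring

-- ===== VERDICT (by name: the statement is the Claim_ definition above) =====
theorem find_indices_to_remove_spec : Claim_equal_find_indices_to_remove := by
  intro source rm _
  show _ = _
  rw [fitr_alt_foldr, find_indices_to_remove]
  have := fitr_key rm source 0 (-1) []
  simpa using this
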